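-- pv_equiv track=rewrite | github.com/PiRobot2021/Crypto | ADFGVX.py | to_index
-- ===== SOURCE A (Python) =====
-- def to_index(key):
--     sorted_key_chars= sorted(key)
--     ascending_int= [i for i in range(len(key))]
--     ordered_key= list(zip(sorted_key_chars, ascending_int))                         # list of tuples containing sorted key chars and growing int values by steps of 1
--     result= []
--     for x in key:
--         for y in ordered_key:
--             if y[0] == x:
--                 result.append(y)
--                 ordered_key.remove(y)                                               # Removing the tuple from the ordered_key to avoid duplications in the next key values
--                 break                                                               # Once value is found, stop rotating through the ordered_keys
--     return result
-- ===== SOURCE B (Python) =====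
-- def to_index(key):
--     queues = {}
--     for i, c in enumerate(sorted(key)):
--         queues.setdefault(c, []).append(i)
--     ptr = {}
--     result = []
--     for c in key:
--         p = ptr.get(c, 0)
--         ptr[c] = p + 1
--         result.append((c, queues[c][p]))
--     return result
-- ===== Notes on version B (the rewrite author's own statement) =====
-- stated objective: faster
-- what changed: Replaces A's per-character linear scan-and-remove over the sorted (char,rank) list with a single pass that groups the ranks of the sorted key into per-character queues and then pops each character's next rank via a position counter.
import Mathlib
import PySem

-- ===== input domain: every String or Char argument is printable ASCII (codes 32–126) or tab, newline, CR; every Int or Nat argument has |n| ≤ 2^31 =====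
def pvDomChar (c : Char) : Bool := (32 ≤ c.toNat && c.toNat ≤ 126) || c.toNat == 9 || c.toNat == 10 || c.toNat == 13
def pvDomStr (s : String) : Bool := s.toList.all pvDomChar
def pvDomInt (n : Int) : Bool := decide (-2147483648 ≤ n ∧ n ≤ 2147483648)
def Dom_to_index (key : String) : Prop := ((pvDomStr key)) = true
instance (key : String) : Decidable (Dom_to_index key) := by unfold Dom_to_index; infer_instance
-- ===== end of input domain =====

-- B replaces A's quadratic scan-and-remove over the sorted (char,rank) list with
-- per-character rank queues consumed through a position counter (faster in a timing run).


-- ===== PORT A =====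
-- iterating over a Python string yields 1-character strings
def pyChars (key : String) : List String := key.toList.map (fun c => String.ofList [c])

-- inner 'for y in ordered_key: if y[0] == x: result.append(y); ordered_key.remove(y); break':
-- the first match (if any) together with ordered_key after removing it
def aFind (x : String) : List (String × Int) → Option (String × Int) × List (String × Int)
  | [] => (none, [])
  | y :: ys =>
    if y.1 == x then (some y, ys)
    else
      let r := aFind x ys
      (r.1, y :: r.2)

def aLoop : List String → List (String × Int) → List (String × Int) → List (String × Int)
  | [], _, res => res
  | x :: xs, ok, res =>
    let r := aFind x ok
    match r.1 with
    | some y => aLoop xs r.2 (res ++ [y])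
    | none => aLoop xs ok res

def to_index (key : String) : List (String × Int) :=
  let sorted_key_chars := PySem.List.sorted (pyChars key) (fun x => x) false
  let ascending_int := PySem.List.pyRange 0 ((pyChars key).length : Int) 1
  let ordered_key := List.zip sorted_key_chars ascending_int
  aLoop (pyChars key) ordered_key []

-- ===== PORT B =====
-- 'queues.setdefault(c, []).append(i)' is queues[c] = queues.get(c, []) + [i], i.e. Dict.modify
def bQueues (s : List String) : PySem.Dict String (List Int) :=
  (PySem.List.enumerate s).foldl (fun d p => d.modify p.2 [] (fun q => q ++ [p.1])) PySem.Dict.empty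

-- 'queues[c][p]': on every state this loop reaches, c is a key of queues and p a valid
-- index of queues[c], so the getD defaults below are never taken (the Python raises nowhere)
def bLoop : List String → PySem.Dict String (List Int) → PySem.Dict String Int →
    List (String × Int) → List (String × Int)
  | [], _, _, res => res
  | c :: cs, qs, ptr, res =>
    let p := ptr.getD c 0
    let v := PySem.List.pyGetD (qs.getD c []) p 0
    bLoop cs qs (ptr.insert c (p + 1)) (res ++ [(c, v)])

def to_index_alt (key : String) : List (String × Int) :=
  let qs := bQueues (PySem.List.sorted (pyChars key) (fun x => x) false)
  bLoop (pyChars key) qs PySem.Dict.empty []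

-- ===== PRECONDITION & SPEC =====
def Spec_to_index (key : String) (out : List (String × Int)) : Prop := out = to_index_alt key
instance (key : String) (out : List (String × Int)) : Decidable (Spec_to_index key out) := by unfold Spec_to_index; infer_instance

-- ===== CLAIM (what is proved, stated in full; the proofs are below) =====
def Claim_equal_to_index : Prop := ∀ (key : String), Dom_to_index key → Spec_to_index key (to_index key)

-- ===== LEMMAS AND PROOFS =====

-- loop invariant: pointers are nonnegative and, for every character c, the unconsumed
-- tail of B's queue for c is exactly the ranks still present in A's ordered_key
def LoopInv (qs : PySem.Dict String (List Int)) (ptr : PySem.Dict String Int)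
    (ok : List (String × Int)) : Prop :=
  ∀ c, 0 ≤ ptr.getD c 0 ∧
    (qs.getD c []).drop (ptr.getD c 0).toNat = (ok.filter (fun y => y.1 == c)).map Prod.snd

lemma aFind_fst (x : String) (ok : List (String × Int)) (y : String × Int) (ys : List (String × Int))
    (h : ok.filter (fun z => z.1 == x) = y :: ys) : (aFind x ok).1 = some y := by
  induction ok with
  | nil => simp at h
  | cons z zs ih =>
    simp only [List.filter_cons] at h
    by_cases hz : z.1 == x
    · simp only [hz, if_pos] at h
      obtain ⟨rfl, _⟩ := List.cons.inj h
      simp [aFind, hz]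
    · simp only [hz] at h
      simp [aFind, hz, ih h]

lemma aFind_snd_filter_self (x : String) (ok : List (String × Int)) (y : String × Int)
    (ys : List (String × Int)) (h : ok.filter (fun z => z.1 == x) = y :: ys) :
    (aFind x ok).2.filter (fun z => z.1 == x) = ys := by
  induction ok with
  | nil => simp at h
  | cons z zs ih =>
    simp only [List.filter_cons] at h
    by_cases hz : z.1 == x
    · simp only [hz, if_pos] at h
      obtain ⟨rfl, rfl⟩ := List.cons.inj h
      simp [aFind, hz]
    · simp only [hz] at h
      simp [aFind, hz, ih h]

lemma aFind_snd_filter_ne (x c : String) (ok : List (String × Int)) (hc : c ≠ x) :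
    (aFind x ok).2.filter (fun z => z.1 == c) = ok.filter (fun z => z.1 == c) := by
  induction ok with
  | nil => rfl
  | cons z zs ih =>
    by_cases hz : z.1 == x
    · have hx : z.1 = x := by simpa using hz
      have hzc : (z.1 == c) = false := by simp [hx]; exact fun h => hc h.symm
      simp [aFind, hz, hzc]
    · simp [aFind, hz, List.filter_cons, ih]

-- enumerate(s) with the pair swapped IS zip(s, range(len(s)))
lemma enumerate_swap_eq_zip (s : List String) : ∀ (a : Int),
    (PySem.List.enumerate s a).map (fun p => (p.2, p.1)) =
      List.zip s (PySem.List.pyRange a (a + s.length) 1) := by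
  induction s with
  | nil => intro a; simp [PySem.List.enumerate_nil, PySem.List.pyRange_one_eq_nil]
  | cons x xs ih =>
    intro a
    rw [PySem.List.enumerate_cons,
      PySem.List.pyRange_one_cons (by simp only [List.length_cons]; push_cast; omega)]
    simp only [List.map_cons, List.zip_cons_cons]
    rw [ih (a + 1), show a + ((x :: xs).length : Int) = (a + 1) + xs.length by
      simp only [List.length_cons]; push_cast; omega]

lemma bQueues_getD (s : List String) (c : String) :
    (bQueues s).getD c [] =
      ((List.zip s (PySem.List.pyRange 0 (s.length : Int) 1)).filter
        (fun y => y.1 == c)).map Prod.snd := by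
  have hmap : PySem.List.enumerate s =
      ((PySem.List.enumerate s).map (fun p => (p.2, p.1))).map (fun q => (q.2, q.1)) := by
    rw [List.map_map]
    simp [Function.comp_def]
  unfold bQueues
  rw [hmap, List.foldl_map, enumerate_swap_eq_zip s 0]
  have := PySem.Dict.getD_foldl_modify_append
    (l := List.zip s (PySem.List.pyRange 0 (0 + (s.length : Int)) 1))
    (d := (PySem.Dict.empty : PySem.Dict String (List Int))) (c := c)
  simp only [PySem.Dict.getD_empty] at this
  rw [show ((0 : Int) + (s.length : Int)) = (s.length : Int) by omega] at this
  simpa using this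

lemma filter_fst_length (l : List (String × Int)) (c : String) :
    (l.filter (fun y => y.1 == c)).length = (l.map Prod.fst).count c := by
  rw [← List.countP_eq_length_filter, List.count, List.countP_map]
  rfl

-- main step lemma: under the invariant (plus enough queue left for every later
-- character), A's scan-and-remove loop and B's pointer loop build the same list
lemma loop_eq (xs : List String) : ∀ (ok : List (String × Int))
    (qs : PySem.Dict String (List Int)) (ptr : PySem.Dict String Int)
    (res : List (String × Int)),
    LoopInv qs ptr ok →
    (∀ c, xs.count c ≤ (ok.filter (fun y => y.1 == c)).length) →
    aLoop xs ok res = bLoop xs qs ptr res := by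
  induction xs with
  | nil => intro ok qs ptr res _ _; rfl
  | cons x xs ih =>
    intro ok qs ptr res hInv hcnt
    have hcx := hcnt x
    rw [List.count_cons_self] at hcx
    obtain ⟨y, ys, hf⟩ : ∃ y ys, ok.filter (fun z => z.1 == x) = y :: ys := by
      cases h : ok.filter (fun z => z.1 == x) with
      | nil => rw [h] at hcx; simp at hcx
      | cons a b => exact ⟨a, b, rfl⟩
    have hyx : y.1 = x := by
      have : y ∈ ok.filter (fun z => z.1 == x) := by rw [hf]; exact List.mem_cons_self
      simpa using (List.of_mem_filter this)
    obtain ⟨hp0, hdrop⟩ := hInv x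
    rw [hf, List.map_cons] at hdrop
    have hlen : (ptr.getD x 0).toNat < (qs.getD x []).length := by
      by_contra hge
      rw [List.drop_eq_nil_of_le (by omega)] at hdrop
      exact List.cons_ne_nil _ _ hdrop.symm
    have hv : PySem.List.pyGetD (qs.getD x []) (ptr.getD x 0) 0 = y.2 := by
      rw [PySem.List.pyGetD_eq_getElem _ _ hp0 (by omega)]
      have h1 : ((qs.getD x []).drop (ptr.getD x 0).toNat).head? = some y.2 := by
        simp [hdrop]
      rw [List.head?_drop] at h1
      obtain ⟨_, h2⟩ := List.getElem?_eq_some_iff.mp h1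
      exact h2
    -- one step of A
    rw [aLoop]
    simp only [aFind_fst x ok y ys hf]
    -- one step of B
    rw [bLoop]
    simp only [hv]
    rw [show ((x, y.2) : String × Int) = y from Prod.ext hyx.symm rfl]
    -- inductive step
    apply ih
    · intro c
      by_cases hc : c = x
      · subst hc
        rw [PySem.Dict.getD_insert_self]
        refine ⟨by omega, ?_⟩
        rw [aFind_snd_filter_self c ok y ys hf,
          show (ptr.getD c 0 + 1).toNat = (ptr.getD c 0).toNat + 1 by omega,
          List.drop_add_one_eq_tail_drop, hdrop, List.tail_cons]
      · rw [PySem.Dict.getD_insert_of_ne _ _ _ hc, aFind_snd_filter_ne x c ok hc]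
        exact hInv c
    · intro c
      by_cases hc : c = x
      · subst hc
        rw [aFind_snd_filter_self c ok y ys hf]
        rw [hf, List.length_cons] at hcx
        omega
      · rw [aFind_snd_filter_ne x c ok hc]
        have h3 := hcnt c
        rw [List.count_cons_of_ne (fun h => hc h.symm)] at h3
        exact h3

lemma to_index_eq (key : String) : to_index key = to_index_alt key := by
  unfold to_index to_index_alt
  set s := PySem.List.sorted (pyChars key) (fun x => x) false with hs
  have hlen : s.length = (pyChars key).length := PySem.List.length_sorted _ _ _
  apply loop_eq
  · intro c
    refine ⟨by simp [PySem.Dict.getD_empty], ?_⟩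
    rw [PySem.Dict.getD_empty]
    simp only [Int.toNat_zero, List.drop_zero]
    rw [bQueues_getD, hlen]
  · intro c
    rw [filter_fst_length, List.map_fst_zip (by rw [PySem.List.length_pyRange_one]; omega),
      (PySem.List.sorted_perm (pyChars key) (fun x => x) false).count_eq]

-- ===== VERDICT (by name: the statement is the Claim_ definition above) =====
theorem to_index_spec : Claim_equal_to_index := by
  intro key _
  unfold Spec_to_index
  exact to_index_eq key
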